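-- pv_equiv track=rewrite | github.com/aconconi/advent-of-code-2020 | aoc2020_day21.py | day21_part1
-- ===== SOURCE A (Python) =====
-- def day21_part1(recipes, recipes_with, may_contain):
--     inert = []
--
--     for ingredient, allergenes in may_contain.items():
--         for a in allergenes.copy():
--             if any(ingredient not in r for r in recipes_with[a]):
--                 allergenes.remove(a)
--         if not allergenes:
--             inert.append(ingredient)
--
--     return sum(ingredient in recipe for recipe in recipes for ingredient in inert)
-- ===== SOURCE B (Python) =====
-- def day21_part1(recipes, recipes_with, may_contain):
--     # Build a per-allergen candidate index once: candidate[a] is the set of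
--     # ingredients common to every recipe listed for a (None = no recipe, all survive).
--     candidate = {}
--     for a, rs in recipes_with.items():
--         cand = None
--         for r in rs:
--             cand = set(r) if cand is None else cand & set(r)
--         candidate[a] = cand
--     inert = []
--     for ingredient, allergenes in may_contain.items():
--         kept = [a for a in allergenes
--                 if candidate[a] is None or ingredient in candidate[a]]
--         allergenes[:] = kept  # same reduced state A leaves in may_contain
--         if not kept:
--             inert.append(ingredient)
--     return sum(sum(1 for recipe in recipes if ing in recipe) for ing in inert)
-- ===== Notes on version B (the rewrite author's own statement) =====
-- stated objective: faster
-- what changed: B precomputes, once per allergen, the intersection of the ingredient sets of its recipes (a candidate index), so the per-(ingredient, allergen) scan of recipes_with[a] and the quadratic remove-from-a-copy loop disappear into set-membership tests, and the final count is done ingredient-major.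
import Mathlib
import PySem

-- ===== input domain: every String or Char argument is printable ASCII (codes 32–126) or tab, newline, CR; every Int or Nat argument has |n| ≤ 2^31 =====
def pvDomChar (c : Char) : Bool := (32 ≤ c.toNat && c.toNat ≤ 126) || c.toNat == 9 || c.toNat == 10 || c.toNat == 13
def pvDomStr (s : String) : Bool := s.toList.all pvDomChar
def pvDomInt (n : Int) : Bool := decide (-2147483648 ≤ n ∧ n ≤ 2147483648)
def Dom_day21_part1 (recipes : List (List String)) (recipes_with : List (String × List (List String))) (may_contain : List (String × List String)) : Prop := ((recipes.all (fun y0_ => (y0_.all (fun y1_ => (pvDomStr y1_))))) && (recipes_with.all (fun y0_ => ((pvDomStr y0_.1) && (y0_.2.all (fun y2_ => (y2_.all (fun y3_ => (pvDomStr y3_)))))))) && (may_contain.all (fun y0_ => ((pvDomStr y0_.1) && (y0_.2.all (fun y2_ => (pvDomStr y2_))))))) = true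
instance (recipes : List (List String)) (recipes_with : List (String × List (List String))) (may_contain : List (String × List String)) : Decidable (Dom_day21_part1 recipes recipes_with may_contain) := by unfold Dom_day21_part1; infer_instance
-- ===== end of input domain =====

-- B replaces A's per-(ingredient, allergen) any-scan over recipes by a per-allergen
-- candidate-intersection index built once, and counts ingredient-major; equivalence is
-- about the RETURN value only (A mutates may_contain in place; Python B performs the same mutation).


-- ===== PORT A =====
def day21_part1 (recipes : List (List String)) (recipes_with : List (String × List (List String))) (may_contain : List (String × List String)) : Int :=
  let inert : List String := may_contain.foldl (fun inert p =>
    -- for a in allergenes.copy(): if any(...): allergenes.remove(a)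
    let allergenes := p.2.foldl (fun al a =>
      -- recipes_with[a]: KeyError on a missing allergen (excluded by Pre_); getD's [] is unreachable there
      if ((PySem.Dict.mk recipes_with).getD a []).any (fun r => !(r.contains p.1)) then
        -- remove? never fails here: a comes from the copy of this very list
        (PySem.List.remove? al a).getD al
      else al) p.2
    if allergenes.isEmpty then inert ++ [p.1] else inert) []
  recipes.foldl (fun s recipe =>
    inert.foldl (fun s ing => s + (if recipe.contains ing then 1 else 0)) s) 0

-- ===== PORT B =====
def day21_part1_alt (recipes : List (List String)) (recipes_with : List (String × List (List String))) (may_contain : List (String × List String)) : Int :=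
  let candidate : PySem.Dict String (Option (PySem.Set String)) :=
    recipes_with.foldl (fun d p =>
      d.insert p.1 (p.2.foldl (fun c r =>
        match c with
        | none => some (PySem.Set.ofList r)
        | some s => some (PySem.Set.inter s (PySem.Set.ofList r))) none)) PySem.Dict.empty
  let inert : List String := may_contain.foldl (fun inert p =>
    let kept := p.2.filter (fun a =>
      -- candidate[a]: KeyError on a missing allergen (excluded by Pre_); getD's none is unreachable there
      match candidate.getD a none with
      | none => true
      | some s => PySem.Set.contains s p.1)
    if kept.isEmpty then inert ++ [p.1] else inert) []
  inert.foldl (fun s ing =>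
    s + recipes.foldl (fun c r => c + (if r.contains ing then 1 else 0)) 0) 0



-- ===== PRECONDITION & SPEC =====
-- First conjunct: exactly where Python A (and B) raise KeyError (an allergen that is not a key
-- of recipes_with). Second conjunct: assoc lists with duplicate keys do not represent a Python
-- dict at all (dict keys are unique), so recipes_with must have distinct keys.
def Pre_day21_part1 (recipes : List (List String)) (recipes_with : List (String × List (List String))) (may_contain : List (String × List String)) : Prop :=
  (∀ p ∈ may_contain, ∀ a ∈ p.2, a ∈ recipes_with.map Prod.fst) ∧ (recipes_with.map Prod.fst).Nodup
instance (recipes : List (List String)) (recipes_with : List (String × List (List String))) (may_contain : List (String × List String)) : Decidable (Pre_day21_part1 recipes recipes_with may_contain) := by unfold Pre_day21_part1; infer_instance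
def pvWitness_day21_part1 : List (List String) × (List (String × List (List String))) × (List (String × List String)) :=
  ([["mxmxvkd", "kfcds"], ["sqjhc"]], [("dairy", [["mxmxvkd", "kfcds"]])], [("kfcds", ["dairy"]), ("sqjhc", [])])

def Spec_day21_part1 (recipes : List (List String)) (recipes_with : List (String × List (List String))) (may_contain : List (String × List String)) (out : Int) : Prop := out = day21_part1_alt recipes recipes_with may_contain
instance (recipes : List (List String)) (recipes_with : List (String × List (List String))) (may_contain : List (String × List String)) (out : Int) : Decidable (Spec_day21_part1 recipes recipes_with may_contain out) := by unfold Spec_day21_part1; infer_instance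

-- ===== CLAIM (what is proved, stated in full; the proofs are below) =====
def Claim_equal_day21_part1 : Prop := ∀ (recipes : List (List String)) (recipes_with : List (String × List (List String))) (may_contain : List (String × List String)), Dom_day21_part1 recipes recipes_with may_contain → Pre_day21_part1 recipes recipes_with may_contain → Spec_day21_part1 recipes recipes_with may_contain (day21_part1 recipes recipes_with may_contain)

-- ===== LEMMAS AND PROOFS =====
-- 1: A's remove-over-copy loop is a filter
theorem pv_removeFold_eq_filter {α : Type} [BEq α] [LawfulBEq α] (C : α → Bool) :
    ∀ (t u : List α),
    t.foldl (fun al a => if C a then (PySem.List.remove? al a).getD al else al)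
      (u.filter (fun a => !C a) ++ t)
    = u.filter (fun a => !C a) ++ t.filter (fun a => !C a) := by
  intro t
  induction t with
  | nil => intro u; simp
  | cons a t' ih =>
    intro u
    by_cases h : C a = true
    · have hu : a ∉ u.filter (fun a => !C a) := by
        intro hmem
        have := (List.mem_filter.mp hmem).2
        simp [h] at this
      have hmem : a ∈ (u.filter (fun a => !C a)) ++ a :: t' := by simp
      have hrem : PySem.List.remove? ((u.filter (fun a => !C a)) ++ a :: t') a
          = some ((u.filter (fun a => !C a)) ++ t') := by
        rw [PySem.List.remove?_eq_some_erase _ _ hmem, List.erase_append_right _ hu,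
          List.erase_cons_head]
      have hfu : (u ++ [a]).filter (fun a => !C a) = u.filter (fun a => !C a) := by
        simp [List.filter_append, h]
      calc (a :: t').foldl (fun al a => if C a then (PySem.List.remove? al a).getD al else al)
              ((u.filter (fun a => !C a)) ++ a :: t')
          = t'.foldl (fun al a => if C a then (PySem.List.remove? al a).getD al else al)
              ((u ++ [a]).filter (fun a => !C a) ++ t') := by
            simp [List.foldl_cons, h, hrem, hfu]
        _ = (u ++ [a]).filter (fun a => !C a) ++ t'.filter (fun a => !C a) := ih (u ++ [a])
        _ = u.filter (fun a => !C a) ++ (a :: t').filter (fun a => !C a) := by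
            simp [hfu, h]
    · have h' : C a = false := by simpa using h
      have hfu : (u ++ [a]).filter (fun a => !C a) = u.filter (fun a => !C a) ++ [a] := by
        simp [List.filter_append, h']
      calc (a :: t').foldl (fun al a => if C a then (PySem.List.remove? al a).getD al else al)
              ((u.filter (fun a => !C a)) ++ a :: t')
          = t'.foldl (fun al a => if C a then (PySem.List.remove? al a).getD al else al)
              ((u ++ [a]).filter (fun a => !C a) ++ t') := by
            simp [List.foldl_cons, h', hfu]
        _ = (u ++ [a]).filter (fun a => !C a) ++ t'.filter (fun a => !C a) := ih (u ++ [a])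
        _ = u.filter (fun a => !C a) ++ (a :: t').filter (fun a => !C a) := by
            simp [hfu, h']

theorem pv_removeFold_self {α : Type} [BEq α] [LawfulBEq α] (C : α → Bool) (t : List α) :
    t.foldl (fun al a => if C a then (PySem.List.remove? al a).getD al else al) t
    = t.filter (fun a => !C a) := by
  simpa using pv_removeFold_eq_filter C t []

-- 2: first-match lookup in a value-mapped literal dict
theorem pv_get?_mk_map {β γ : Type} (g : β → γ) (a : String) :
    ∀ l : List (String × β),
    (PySem.Dict.mk (l.map (fun p => (p.1, g p.2)))).get? a = ((PySem.Dict.mk l).get? a).map g := by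
  intro l
  induction l with
  | nil => rfl
  | cons p l ih =>
    obtain ⟨k, v⟩ := p
    by_cases h : k == a
    · simp [PySem.Dict.get?_mk_cons, h]
    · simp [PySem.Dict.get?_mk_cons, h, ih]

-- 4: the intersection fold decides "ingredient in every recipe"
theorem pv_keep_fold (ing : String) :
    ∀ (rs : List (List String)) (c : Option (PySem.Set String)),
    (match rs.foldl (fun c r =>
        match c with
        | none => some (PySem.Set.ofList r)
        | some s => some (PySem.Set.inter s (PySem.Set.ofList r))) c with
      | none => true
      | some s => PySem.Set.contains s ing)
    = ((match c with
      | none => true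
      | some s => PySem.Set.contains s ing) && !(rs.any fun r => !(r.contains ing))) := by
  intro rs
  induction rs with
  | nil => intro c; simp
  | cons r rs ih =>
    intro c
    rw [List.foldl_cons, ih]
    have hstep : (match (match c with
        | none => some (PySem.Set.ofList r)
        | some s => some (PySem.Set.inter s (PySem.Set.ofList r))) with
        | none => true
        | some s => PySem.Set.contains s ing)
        = ((match c with
        | none => true
        | some s => PySem.Set.contains s ing) && r.contains ing) := by
      cases c with
      | none =>
        simp only [Bool.true_and]
        by_cases hm : ing ∈ r
        · simp [PySem.Set.contains_eq_listContains,  PySem.Set.mem_ofList, hm]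
        · simp [PySem.Set.contains_eq_listContains,  PySem.Set.mem_ofList, hm]
      | some s =>
        by_cases hm : ing ∈ r <;> by_cases hs : ing ∈ s <;>
          simp [PySem.Set.contains_eq_listContains, 
            PySem.Set.mem_inter, PySem.Set.mem_ofList, hm, hs]
    rw [hstep]
    cases (match c with | none => true | some s => PySem.Set.contains s ing) <;>
      simp [List.any_cons]

-- 7: nested-sum swap
theorem pv_sum_swap {α β : Type} (f : α → β → Int) :
    ∀ (R : List β) (I : List α),
    (R.map (fun r => (I.map (fun i => f i r)).sum)).sum
    = (I.map (fun i => (R.map (fun r => f i r)).sum)).sum := by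
  intro R
  induction R with
  | nil => intro I; simp
  | cons r R ih =>
    intro I
    simp only [List.map_cons, List.sum_cons, ih, ← List.sum_map_add]

theorem pv_count_eq (R : List (List String)) (I : List String) :
    R.foldl (fun s recipe => I.foldl (fun s ing => s + (if recipe.contains ing then (1:Int) else 0)) s) 0
    = I.foldl (fun s ing => s + R.foldl (fun c r => c + (if r.contains ing then (1:Int) else 0)) 0) 0 := by
  simp only [PySem.List.foldl_add, zero_add]
  rw [pv_sum_swap]

theorem pv_main (recipes : List (List String)) (recipes_with : List (String × List (List String))) (may_contain : List (String × List String))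
    (hnd : (recipes_with.map Prod.fst).Nodup) :
    day21_part1 recipes recipes_with may_contain = day21_part1_alt recipes recipes_with may_contain := by
  unfold day21_part1 day21_part1_alt
  have hcand : (recipes_with.foldl (fun d p =>
      d.insert p.1 (p.2.foldl (fun c r =>
        match c with
        | none => some (PySem.Set.ofList r)
        | some s => some (PySem.Set.inter s (PySem.Set.ofList r))) none)) PySem.Dict.empty)
      = PySem.Dict.mk (recipes_with.map (fun p => (p.1, p.2.foldl (fun c r =>
        match c with
        | none => some (PySem.Set.ofList r)
        | some s => some (PySem.Set.inter s (PySem.Set.ofList r))) none))) := by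
    apply PySem.Dict.ext
    rw [PySem.Dict.items_foldl_insert_fresh recipes_with Prod.fst _ _ (fun a _ => PySem.Dict.contains_empty a.1) hnd]
    rfl
  rw [hcand]
  have hpred : ∀ (ing a : String),
      (match (PySem.Dict.mk (recipes_with.map (fun p => (p.1, p.2.foldl (fun c r =>
          match c with
          | none => some (PySem.Set.ofList r)
          | some s => some (PySem.Set.inter s (PySem.Set.ofList r))) none)))).getD a none with
        | none => true
        | some s => PySem.Set.contains s ing)
      = !(((PySem.Dict.mk recipes_with).getD a []).any (fun r => !(r.contains ing))) := by
    intro ing a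
    rw [PySem.Dict.getD_eq_get?_getD, PySem.Dict.getD_eq_get?_getD, pv_get?_mk_map]
    cases h : (PySem.Dict.mk recipes_with).get? a with
    | none => simp
    | some rs =>
      simp only [Option.map_some, Option.getD_some]
      simpa using pv_keep_fold ing rs none
  have hinert : (may_contain.foldl (fun inert p =>
      if (p.2.foldl (fun al a =>
        if ((PySem.Dict.mk recipes_with).getD a []).any (fun r => !(r.contains p.1)) then
          (PySem.List.remove? al a).getD al
        else al) p.2).isEmpty then inert ++ [p.1] else inert) [])
      = (may_contain.foldl (fun inert p =>
      if (p.2.filter (fun a =>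
        match (PySem.Dict.mk (recipes_with.map (fun p => (p.1, p.2.foldl (fun c r =>
          match c with
          | none => some (PySem.Set.ofList r)
          | some s => some (PySem.Set.inter s (PySem.Set.ofList r))) none)))).getD a none with
        | none => true
        | some s => PySem.Set.contains s p.1)).isEmpty then inert ++ [p.1] else inert) []) := by
    congr 1
    funext inert p
    rw [pv_removeFold_self]
    rw [List.filter_congr (fun a _ => (hpred p.1 a).symm)]
  rw [hinert, pv_count_eq]

-- ===== VERDICT (by name: the statement is the Claim_ definition above) =====
theorem day21_part1_spec : Claim_equal_day21_part1 := by
  intro recipes recipes_with may_contain _hdom hpre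
  unfold Spec_day21_part1
  exact pv_main recipes recipes_with may_contain hpre.2
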